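-- pv_equiv track=rewrite | github.com/Mohsenmohebbi1993/AI-BOOTCAMP | notebooks/Project/2. HW_L02_02_python/Mini Recommendation System/recommender.py | ranking_old_user
-- ===== SOURCE A (Python) =====
-- def ranking_old_user(user_data, user_movies):
--     OLD_USERS = list(user_data.keys()) # list all old user
--     ranking_old_user_dict = {}
--     for each_old_user in OLD_USERS:
--         grade_old_user = 0
--         for each_old_user_movie in user_data[each_old_user]:
--             for new_use_movie in user_movies:
--                 if each_old_user_movie == new_use_movie:
--                     grade_old_user +=1
--         ranking_old_user_dict[each_old_user] = grade_old_user
--     return ranking_old_user_dict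
-- ===== SOURCE B (Python) =====
-- def ranking_old_user(user_data, user_movies):
--     # Push-based inverted index: map each movie to the list of old users owning it
--     # (one entry per occurrence), then walk the new user's movie list once and push
--     # one point to every owner of each movie. No per-user counting scan remains.
--     index = {}
--     for u, movies in user_data.items():
--         for m in movies:
--             index.setdefault(m, []).append(u)
--     grades = {u: 0 for u in user_data}
--     for m in user_movies:
--         for u in index.get(m, []):
--             grades[u] += 1
--     return grades
-- ===== Notes on version B (the rewrite author's own statement) =====
-- stated objective: faster
-- what changed: Inverts the traversal: instead of scoring each old user by scanning user_movies per owned movie, B builds an inverted index movie->owners once and streams user_movies, pushing one point to each owner of each movie.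
import Mathlib
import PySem

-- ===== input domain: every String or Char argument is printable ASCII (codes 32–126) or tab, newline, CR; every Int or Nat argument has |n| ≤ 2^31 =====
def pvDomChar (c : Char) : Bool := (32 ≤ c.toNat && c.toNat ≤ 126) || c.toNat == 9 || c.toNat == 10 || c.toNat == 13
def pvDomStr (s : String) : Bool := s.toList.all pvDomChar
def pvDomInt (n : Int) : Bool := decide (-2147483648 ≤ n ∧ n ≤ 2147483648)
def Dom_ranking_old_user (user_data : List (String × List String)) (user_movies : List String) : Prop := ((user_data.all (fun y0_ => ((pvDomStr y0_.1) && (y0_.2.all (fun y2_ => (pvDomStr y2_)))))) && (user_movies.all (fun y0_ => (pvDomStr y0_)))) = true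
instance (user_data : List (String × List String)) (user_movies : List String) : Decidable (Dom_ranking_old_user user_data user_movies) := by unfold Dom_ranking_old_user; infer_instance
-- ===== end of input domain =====

-- B inverts the traversal: it builds an inverted index movie -> owners once, then streams
-- user_movies, pushing one point to each owner of each movie (instead of A's per-user scans
-- of user_movies for every owned movie).

-- ===== PORT A =====
-- A's dict parameter arrives as an association list; the dict it denotes is PySem.Dict.ofList.
def ranking_old_user (user_data : List (String × List String)) (user_movies : List String) : List (String × Int) :=
  let d := PySem.Dict.ofList user_data
  let OLD_USERS := d.keys
  (OLD_USERS.foldl (fun acc u =>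
      acc.insert u
        ((d.getD u []).foldl (fun g m =>
            user_movies.foldl (fun g' nm => if m == nm then g' + 1 else g') g) (0 : Int)))
    PySem.Dict.empty).items

-- ===== PORT B =====
def ranking_old_user_alt (user_data : List (String × List String)) (user_movies : List String) : List (String × Int) :=
  let ud := PySem.Dict.ofList user_data
  -- index.setdefault(m, []).append(u)  ==  index[m] = index.get(m, []) + [u]
  let index := ud.items.foldl
    (fun ix p => p.2.foldl (fun ix m => ix.modify m [] (fun l => l ++ [p.1])) ix)
    (PySem.Dict.empty : PySem.Dict String (List String))
  let grades0 := ud.keys.foldl (fun g u => g.insert u (0 : Int)) PySem.Dict.empty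
  -- grades[u] += 1 : u is always an existing key of grades (index values are keys of user_data)
  let grades := user_movies.foldl
    (fun g m => (index.getD m []).foldl (fun g u => g.modify u 0 (· + 1)) g) grades0
  grades.items

-- ===== PRECONDITION & SPEC =====
def Spec_ranking_old_user (user_data : List (String × List String)) (user_movies : List String) (out : List (String × Int)) : Prop := out = ranking_old_user_alt user_data user_movies
instance (user_data : List (String × List String)) (user_movies : List String) (out : List (String × Int)) : Decidable (Spec_ranking_old_user user_data user_movies out) := by unfold Spec_ranking_old_user; infer_instance

-- ===== CLAIM (what is proved, stated in full; the proofs are below) =====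
def Claim_equal_ranking_old_user : Prop := ∀ (user_data : List (String × List String)) (user_movies : List String), Dom_ranking_old_user user_data user_movies → Spec_ranking_old_user user_data user_movies (ranking_old_user user_data user_movies)

-- ===== LEMMAS AND PROOFS =====

-- A's grade of one user: the two inner scans sum, per owned movie, its occurrences in um.
theorem gradeA_eq (mv um : List String) :
    mv.foldl (fun g m => um.foldl (fun g' nm => if m == nm then g' + 1 else g') g) (0 : Int)
      = (mv.map (fun m => (um.count m : Int))).sum := by
  have h : ∀ (g : Int), ∀ m ∈ mv,
      um.foldl (fun g' nm => if m == nm then g' + 1 else g') g = g + (um.count m : Int) := by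
    intro g m _
    have e : (fun (g' : Int) nm => if m == nm then g' + 1 else g')
        = (fun (g' : Int) nm => if nm == m then g' + 1 else g') := by
      funext g' nm
      by_cases hh : m = nm
      · simp [hh]
      · simp [hh, Ne.symm hh]
    rw [e, PySem.List.foldl_beq_add_one]
  calc mv.foldl (fun g m => um.foldl (fun g' nm => if m == nm then g' + 1 else g') g) (0 : Int)
      = mv.foldl (fun g m => g + (um.count m : Int)) (0 : Int) :=
        PySem.List.foldl_congr_mem mv _ _ _ h
    _ = 0 + (mv.map (fun m => (um.count m : Int))).sum := PySem.List.foldl_add mv _ 0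
    _ = _ := zero_add _

-- double counting: summing X-counts over Y equals summing Y-counts over X
theorem exch (X Y : List String) :
    (Y.map (fun y => (X.count y : Int))).sum = (X.map (fun x => (Y.count x : Int))).sum := by
  induction Y with
  | nil => simp
  | cons y ys ih =>
      have h : (X.map (fun x => ((y :: ys).count x : Int))).sum
          = (X.map (fun x => (ys.count x : Int))).sum + (X.map (fun x => if x == y then (1:Int) else 0)).sum := by
        rw [← PySem.List.sum_map_add_int]
        refine congrArg List.sum (List.map_congr_left ?_)
        intro x _
        simp [List.count_cons]
        by_cases hh : x = y
        · simp [hh]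
        · simp [hh, Ne.symm hh]
      rw [h, PySem.List.sum_map_ite_one_zero, ← ih]
      have hc : X.countP (fun x => x == y) = X.count y := rfl
      simp [hc, add_comm]

-- picking the unique pair with first component u out of a nodup-keyed association list
theorem sum_pick_nat (items : List (String × List String)) (u : String) (mv : List String)
    (T : List String → Nat) (hnd : (items.map Prod.fst).Nodup) (hmem : (u, mv) ∈ items) :
    (items.map (fun p => if p.1 = u then T p.2 else 0)).sum = T mv := by
  induction items with
  | nil => simp at hmem
  | cons p rest ih =>
      simp only [List.map_cons, List.nodup_cons, List.mem_map] at hnd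
      rcases List.mem_cons.mp hmem with hp | hp
      · subst hp
        simp only [List.map_cons, List.sum_cons]
        have hz : (rest.map (fun p => if p.1 = u then T p.2 else 0)).sum = 0 := by
          refine List.sum_eq_zero ?_
          intro x hx
          rcases List.mem_map.mp hx with ⟨q, hq, rfl⟩
          have : q.1 ≠ u := by
            intro he
            exact hnd.1 ⟨q, hq, he⟩
          simp [this]
        simp [hz]
      · have hne : p.1 ≠ u := by
          intro he
          exact hnd.1 ⟨(u, mv), hp, he.symm ▸ rfl⟩
        simp only [List.map_cons, List.sum_cons, if_neg hne, Nat.zero_add]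
        exact ih hnd.2 hp

-- the inverted index at movie m: owners in item order, one entry per occurrence of m
theorem idx_getD (items : List (String × List String)) (ix : PySem.Dict String (List String)) (m : String) :
    (items.foldl (fun ix p => p.2.foldl (fun ix mm => ix.modify mm [] (fun l => l ++ [p.1])) ix) ix).getD m []
      = ix.getD m [] ++ items.flatMap (fun p => ((p.2.filter (fun mm => mm == m)).map (fun _ => p.1))) := by
  induction items generalizing ix with
  | nil => simp
  | cons p rest ih =>
      simp only [List.foldl_cons, List.flatMap_cons, ih]
      have e : p.2.foldl (fun ix mm => ix.modify mm [] (fun l => l ++ [p.1])) ix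
          = (p.2.map (fun mm => (mm, p.1))).foldl (fun ix q => ix.modify q.1 [] (fun l => l ++ [q.2])) ix :=
        (List.foldl_map (f := fun mm => (mm, p.1))
          (g := fun (ix : PySem.Dict String (List String)) (q : String × String) => ix.modify q.1 [] (fun l => l ++ [q.2]))).symm
      rw [e, PySem.Dict.getD_foldl_modify_append]
      simp [List.filter_map, List.map_map, Function.comp_def, List.map_const']

-- the push loop: each user's grade grows by its number of occurrences among the pushed owners
theorem bump_getD (F : String → List String) (l : List String) (g : PySem.Dict String Int) (u : String) :
    (l.foldl (fun g m => (F m).foldl (fun g u' => g.modify u' 0 (· + 1)) g) g).getD u 0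
      = g.getD u 0 + (l.map (fun m => ((F m).count u : Int))).sum := by
  induction l generalizing g with
  | nil => simp
  | cons m t ih =>
      simp only [List.foldl_cons, List.map_cons, List.sum_cons, ih,
        PySem.Dict.getD_foldl_modify_add_one]
      ring

-- updating a set with elements it already has leaves it unchanged
theorem set_update_id (xs : List String) (s : PySem.Set String) (h : ∀ x ∈ xs, x ∈ s) :
    PySem.Set.update s xs = s := by
  induction xs generalizing s with
  | nil => rfl
  | cons x t ih =>
      have e : PySem.Set.update s (x :: t) = PySem.Set.update (PySem.Set.add s x) t := rfl
      rw [e, PySem.Set.add_of_mem (h x (by simp))]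
      exact ih s (fun y hy => h y (by simp [hy]))

-- the push loop never adds keys when every pushed owner is already a key
theorem bump_keys (F : String → List String) (l : List String) (g : PySem.Dict String Int)
    (h : ∀ m ∈ l, ∀ u ∈ F m, u ∈ g.keys) :
    (l.foldl (fun g m => (F m).foldl (fun g u' => g.modify u' 0 (· + 1)) g) g).keys = g.keys := by
  induction l generalizing g with
  | nil => rfl
  | cons m t ih =>
      simp only [List.foldl_cons]
      have hk : ((F m).foldl (fun g u' => g.modify u' 0 (· + 1)) g).keys = g.keys := by
        rw [PySem.Dict.keys_foldl_modify (f := fun _ _ v => v + 1)]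
        exact set_update_id _ _ (h m (by simp))
      rw [ih _ (by intro m' hm' u hu; rw [hk]; exact h m' (by simp [hm']) u hu), hk]

-- the zero-initialisation loop leaves every looked-up grade at 0
theorem init_getD (l : List String) (g : PySem.Dict String Int) (u : String) (h : g.getD u 0 = 0) :
    (l.foldl (fun g u' => g.insert u' (0 : Int)) g).getD u 0 = 0 := by
  induction l generalizing g with
  | nil => simpa using h
  | cons x t ih =>
      refine ih _ ?_
      rw [PySem.Dict.getD_insert]
      split <;> simp [h]

theorem ranking_old_user_eq (user_data : List (String × List String)) (user_movies : List String) :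
    ranking_old_user user_data user_movies = ranking_old_user_alt user_data user_movies := by
  unfold ranking_old_user ranking_old_user_alt
  dsimp only []
  set d := PySem.Dict.ofList user_data with hd
  have hnd : d.keys.Nodup := PySem.Dict.nodup_keys_ofList user_data
  -- A side: a loop of inserts at the fresh distinct keys appends
  rw [PySem.Dict.items_foldl_insert_fresh (k := fun u => u) _ _ _ (by simp) (by simpa using hnd)]
  have he : (PySem.Dict.empty : PySem.Dict String Int).items = [] := rfl
  rw [he, List.nil_append]
  -- B side
  set idx := d.items.foldl
    (fun ix p => p.2.foldl (fun ix m => ix.modify m [] (fun l => l ++ [p.1])) ix)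
    (PySem.Dict.empty : PySem.Dict String (List String)) with hidx
  set g0 := d.keys.foldl (fun g u => g.insert u (0 : Int)) PySem.Dict.empty with hg0
  have hidxD : ∀ m, idx.getD m []
      = d.items.flatMap (fun p => ((p.2.filter (fun mm => mm == m)).map (fun _ => p.1))) := by
    intro m
    rw [hidx, idx_getD]
    simp [PySem.Dict.getD_empty]
  have hg0keys : g0.keys = d.keys := by
    rw [hg0, PySem.Dict.keys]
    rw [PySem.Dict.items_foldl_insert_fresh (k := fun u => u) _ _ _ (by simp) (by simpa using hnd)]
    simp [he, Function.comp_def]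
  have hmemkeys : ∀ m ∈ user_movies, ∀ u ∈ idx.getD m [], u ∈ g0.keys := by
    intro m _ u hu
    rw [hidxD m] at hu
    rcases List.mem_flatMap.mp hu with ⟨p, hp, hup⟩
    rcases List.mem_map.mp hup with ⟨_, _, rfl⟩
    rw [hg0keys]
    have : p.1 ∈ d.items.map Prod.fst := List.mem_map.mpr ⟨p, hp, rfl⟩
    simpa [PySem.Dict.keys] using this
  set G := user_movies.foldl
    (fun g m => (idx.getD m []).foldl (fun g u => g.modify u 0 (· + 1)) g) g0 with hG
  have hGkeys : G.keys = d.keys := by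
    rw [hG, bump_keys _ _ _ hmemkeys, hg0keys]
  have hGnd : G.keys.Nodup := by rw [hGkeys]; exact hnd
  rw [PySem.Dict.items_eq_map_keys G hGnd 0, hGkeys]
  refine List.map_congr_left ?_
  intro u hu
  have hkeq : d.keys = d.items.map Prod.fst := by simp [PySem.Dict.keys]
  rcases List.mem_map.mp (by rw [← hkeq]; exact hu : u ∈ d.items.map Prod.fst) with ⟨p, hp, rfl⟩
  have hget : d.getD p.1 [] = p.2 := PySem.Dict.getD_of_mem_items d (by exact hp) hnd []
  have hndi : (d.items.map Prod.fst).Nodup := by rw [← hkeq]; exact hnd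
  have hcnt : ∀ m, (idx.getD m []).count p.1 = p.2.count m := by
    intro m
    rw [hidxD m, List.count_flatMap]
    have hseg : ∀ q ∈ d.items, (List.count p.1 ∘ fun p' => ((p'.2.filter (fun mm => mm == m)).map (fun _ => p'.1))) q
        = if q.1 = p.1 then q.2.count m else 0 := by
      intro q _
      simp only [Function.comp_apply, List.map_const', List.count_replicate]
      by_cases hq : q.1 = p.1
      · simp [hq, List.count, List.countP_eq_length_filter]
      · simp [fun hc => hq (by simpa using hc)]
    rw [List.map_congr_left hseg]
    exact sum_pick_nat d.items p.1 p.2 (fun l => l.count m) hndi hp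
  have hBval : G.getD p.1 0 = (user_movies.map (fun m => (p.2.count m : Int))).sum := by
    rw [hG, bump_getD]
    have : g0.getD p.1 0 = 0 := by
      rw [hg0]
      exact init_getD _ _ _ (by simp [PySem.Dict.getD_empty])
    rw [this, zero_add]
    refine congrArg List.sum (List.map_congr_left ?_)
    intro m _
    rw [hcnt m]
  rw [hBval, hget, gradeA_eq]
  exact congrArg (Prod.mk p.1) (exch user_movies p.2)

-- ===== VERDICT (by name: the statement is the Claim_ definition above) =====
theorem ranking_old_user_spec : Claim_equal_ranking_old_user := by
  intro user_data user_movies _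
  exact ranking_old_user_eq user_data user_movies
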